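-- pv_equiv track=rewrite | github.com/vkhansen/probablyprofit | probablyprofit/sources/reddit.py | _select_subreddits
-- ===== SOURCE A (Python) =====
-- def _select_subreddits(query: str) -> list[str]:
--     """Auto-select relevant subreddits based on query."""
--     query_lower = query.lower()
--
--     subreddits = []
--
--     # Crypto keywords
--     if any(kw in query_lower for kw in ["bitcoin", "btc", "crypto", "ethereum", "eth"]):
--         subreddits.extend(["cryptocurrency", "bitcoin", "ethereum", "cryptomarkets"])
--
--     # Politics keywords
--     if any(
--         kw in query_lower
--         for kw in ["trump", "biden", "election", "congress", "senate", "president"]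
--     ):
--         subreddits.extend(["politics", "news", "conservative", "liberal"])
--
--     # Sports keywords
--     if any(
--         kw in query_lower for kw in ["nfl", "nba", "super bowl", "championship", "playoffs"]
--     ):
--         subreddits.extend(["sports", "nfl", "nba", "sportsbook"])
--
--     # Finance keywords
--     if any(
--         kw in query_lower for kw in ["stock", "market", "fed", "interest rate", "inflation"]
--     ):
--         subreddits.extend(["wallstreetbets", "stocks", "investing", "economics"])
--
--     # Tech keywords
--     if any(kw in query_lower for kw in ["ai", "tech", "apple", "google", "microsoft"]):
--         subreddits.extend(["technology", "artificial", "stocks"])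
--
--     # Prediction market subreddits
--     subreddits.extend(["polymarket", "predictit"])
--
--     # Dedupe while preserving order
--     seen = set()
--     unique = []
--     for s in subreddits:
--         if s not in seen:
--             seen.add(s)
--             unique.append(s)
--
--     return unique if unique else ["news", "worldnews"]
-- ===== SOURCE B (Python) =====
-- # B: inverted-index + staged passes. Instead of five hard-coded if/extend blocks
-- # with per-group any() tests and a seen-set dedupe loop, B scans ONE flat
-- # keyword->group index to collect the set of matched group ids, then emits the
-- # subreddit groups selected by that set in one comprehension, and dedupes by a
-- # recursive "keep head, filter it out of the tail" pass.
--
-- _KEYWORD_INDEX = [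
--     ("bitcoin", 0), ("btc", 0), ("crypto", 0), ("ethereum", 0), ("eth", 0),
--     ("trump", 1), ("biden", 1), ("election", 1), ("congress", 1), ("senate", 1), ("president", 1),
--     ("nfl", 2), ("nba", 2), ("super bowl", 2), ("championship", 2), ("playoffs", 2),
--     ("stock", 3), ("market", 3), ("fed", 3), ("interest rate", 3), ("inflation", 3),
--     ("ai", 4), ("tech", 4), ("apple", 4), ("google", 4), ("microsoft", 4),
-- ]
--
-- _GROUP_SUBS = [
--     ["cryptocurrency", "bitcoin", "ethereum", "cryptomarkets"],
--     ["politics", "news", "conservative", "liberal"],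
--     ["sports", "nfl", "nba", "sportsbook"],
--     ["wallstreetbets", "stocks", "investing", "economics"],
--     ["technology", "artificial", "stocks"],
-- ]
--
--
-- def _first_occurrences(xs):
--     """Order-preserving dedup: keep the head, recurse on the tail with it removed."""
--     if not xs:
--         return []
--     return [xs[0]] + _first_occurrences([x for x in xs[1:] if x != xs[0]])
--
--
-- def _select_subreddits(query: str) -> list[str]:
--     """Auto-select relevant subreddits based on query."""
--     q = query.lower()
--     matched = set()
--     for kw, g in _KEYWORD_INDEX:
--         if kw in q:
--             matched.add(g)
--     pool = [s for g, subs in enumerate(_GROUP_SUBS) if g in matched for s in subs]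
--     pool += ["polymarket", "predictit"]
--     unique = _first_occurrences(pool)
--     return unique if unique else ["news", "worldnews"]
-- ===== Notes on version B (the rewrite author's own statement) =====
-- stated objective: alternative
-- what changed: Replaces A's five hard-coded if/extend blocks with per-group any() tests and a seen-set dedupe loop by an inverted keyword->group-id index scanned once to collect the matched group-id set, a single comprehension that emits the subreddit groups selected by that set, and a recursive filter-based order-preserving dedup.
import Mathlib
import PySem

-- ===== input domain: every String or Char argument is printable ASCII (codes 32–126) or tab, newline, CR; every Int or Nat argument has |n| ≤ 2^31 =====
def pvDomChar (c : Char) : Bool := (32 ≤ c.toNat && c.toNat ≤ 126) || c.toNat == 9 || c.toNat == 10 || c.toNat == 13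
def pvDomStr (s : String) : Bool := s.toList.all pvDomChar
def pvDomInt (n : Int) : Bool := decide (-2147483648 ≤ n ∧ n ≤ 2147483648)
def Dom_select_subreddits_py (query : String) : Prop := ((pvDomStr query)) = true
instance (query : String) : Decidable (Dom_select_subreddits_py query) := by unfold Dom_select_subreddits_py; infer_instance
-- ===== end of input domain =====

-- B replaces A's five hard-coded if/extend blocks and seen-set dedupe loop with an inverted
-- keyword->group index scanned once, a comprehension emitting the matched groups, and a
-- recursive filter-based order-preserving dedup; objective: alternative decomposition, same cost.

-- ===== PORT A =====
def select_subreddits_py (query : String) : List String :=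
  let query_lower := PySem.Str.lower query
  let subreddits : List String := []
  let subreddits :=
    if (["bitcoin", "btc", "crypto", "ethereum", "eth"] : List String).any
        (fun kw => PySem.Str.isIn kw query_lower) then
      subreddits ++ ["cryptocurrency", "bitcoin", "ethereum", "cryptomarkets"]
    else subreddits
  let subreddits :=
    if (["trump", "biden", "election", "congress", "senate", "president"] : List String).any
        (fun kw => PySem.Str.isIn kw query_lower) then
      subreddits ++ ["politics", "news", "conservative", "liberal"]
    else subreddits
  let subreddits :=
    if (["nfl", "nba", "super bowl", "championship", "playoffs"] : List String).any
        (fun kw => PySem.Str.isIn kw query_lower) then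
      subreddits ++ ["sports", "nfl", "nba", "sportsbook"]
    else subreddits
  let subreddits :=
    if (["stock", "market", "fed", "interest rate", "inflation"] : List String).any
        (fun kw => PySem.Str.isIn kw query_lower) then
      subreddits ++ ["wallstreetbets", "stocks", "investing", "economics"]
    else subreddits
  let subreddits :=
    if (["ai", "tech", "apple", "google", "microsoft"] : List String).any
        (fun kw => PySem.Str.isIn kw query_lower) then
      subreddits ++ ["technology", "artificial", "stocks"]
    else subreddits
  let subreddits := subreddits ++ ["polymarket", "predictit"]
  -- dedupe while preserving order: (seen, unique) state
  let st := subreddits.foldl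
    (fun (st : PySem.Set String × List String) s =>
      if !(PySem.Set.contains st.1 s) then (PySem.Set.add st.1 s, st.2 ++ [s]) else st)
    (PySem.Set.empty, [])
  let unique := st.2
  if unique.isEmpty then ["news", "worldnews"] else unique

-- ===== PORT B =====
def pvKeywordIndex : List (String × Int) :=
  [ ("bitcoin", 0), ("btc", 0), ("crypto", 0), ("ethereum", 0), ("eth", 0),
    ("trump", 1), ("biden", 1), ("election", 1), ("congress", 1), ("senate", 1), ("president", 1),
    ("nfl", 2), ("nba", 2), ("super bowl", 2), ("championship", 2), ("playoffs", 2),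
    ("stock", 3), ("market", 3), ("fed", 3), ("interest rate", 3), ("inflation", 3),
    ("ai", 4), ("tech", 4), ("apple", 4), ("google", 4), ("microsoft", 4) ]

def pvGroupSubs : List (List String) :=
  [ ["cryptocurrency", "bitcoin", "ethereum", "cryptomarkets"],
    ["politics", "news", "conservative", "liberal"],
    ["sports", "nfl", "nba", "sportsbook"],
    ["wallstreetbets", "stocks", "investing", "economics"],
    ["technology", "artificial", "stocks"] ]

-- order-preserving dedup: keep the head, recurse on the tail with it filtered out
-- (structural recursion on a fuel bound = the list length; the filter never grows the list,
-- so the fuel is exactly enough and the 0-fuel branch is unreachable)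
def pvFirstOccGo : Nat → List String → List String
  | _, [] => []
  | 0, _ :: _ => []
  | n + 1, x :: xs => x :: pvFirstOccGo n (xs.filter (fun y => y ≠ x))

def pvFirstOccurrences (xs : List String) : List String := pvFirstOccGo xs.length xs

def select_subreddits_py_alt (query : String) : List String :=
  let q := PySem.Str.lower query
  let matched : PySem.Set Int := pvKeywordIndex.foldl
    (fun s p => if PySem.Str.isIn p.1 q then PySem.Set.add s p.2 else s)
    PySem.Set.empty
  let pool := (PySem.List.enumerate pvGroupSubs).flatMap
    (fun p => if PySem.Set.contains matched p.1 then p.2 else [])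
  let pool := pool ++ ["polymarket", "predictit"]
  let unique := pvFirstOccurrences pool
  if unique.isEmpty then ["news", "worldnews"] else unique

-- ===== PRECONDITION & SPEC =====
def Spec_select_subreddits_py (query : String) (out : List String) : Prop := out = select_subreddits_py_alt query
instance (query : String) (out : List String) : Decidable (Spec_select_subreddits_py query out) := by unfold Spec_select_subreddits_py; infer_instance

-- ===== CLAIM (what is proved, stated in full; the proofs are below) =====
def Claim_equal_select_subreddits_py : Prop := ∀ (query : String), Dom_select_subreddits_py query → Spec_select_subreddits_py query (select_subreddits_py query)

-- ===== LEMMAS AND PROOFS =====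

-- Membership in the set built by folding an "add group id if keyword matches" step.
lemma pv_contains_foldl_add (q : String) (ps : List (String × Int)) (s0 : PySem.Set Int) (g : Int) :
    PySem.Set.contains
      (ps.foldl (fun s p => if PySem.Str.isIn p.1 q then PySem.Set.add s p.2 else s) s0) g
    = (PySem.Set.contains s0 g || ps.any (fun p => PySem.Str.isIn p.1 q && p.2 == g)) := by
  induction ps generalizing s0 with
  | nil => simp
  | cons p ps ih =>
    simp only [List.foldl_cons, List.any_cons, ih]
    by_cases h : PySem.Str.isIn p.1 q = true <;>
      by_cases he : p.2 = g <;>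
      by_cases hc : g ∈ s0 <;>
      by_cases hm : p.2 ∈ s0 <;>
      simp_all [PySem.Set.add, PySem.Set.contains, List.mem_append] <;>
      simp [beq_iff_eq, he, Ne.symm he]

-- Both ports as functions of the five group-match booleans.
def pvACore (b1 b2 b3 b4 b5 : Bool) : List String :=
  let subreddits : List String := []
  let subreddits := if b1 then subreddits ++ ["cryptocurrency", "bitcoin", "ethereum", "cryptomarkets"] else subreddits
  let subreddits := if b2 then subreddits ++ ["politics", "news", "conservative", "liberal"] else subreddits
  let subreddits := if b3 then subreddits ++ ["sports", "nfl", "nba", "sportsbook"] else subreddits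
  let subreddits := if b4 then subreddits ++ ["wallstreetbets", "stocks", "investing", "economics"] else subreddits
  let subreddits := if b5 then subreddits ++ ["technology", "artificial", "stocks"] else subreddits
  let subreddits := subreddits ++ ["polymarket", "predictit"]
  let st := subreddits.foldl
    (fun (st : PySem.Set String × List String) s =>
      if !(PySem.Set.contains st.1 s) then (PySem.Set.add st.1 s, st.2 ++ [s]) else st)
    (PySem.Set.empty, [])
  let unique := st.2
  if unique.isEmpty then ["news", "worldnews"] else unique

def pvBCore (b1 b2 b3 b4 b5 : Bool) : List String :=
  let pool :=
    (if b1 then ["cryptocurrency", "bitcoin", "ethereum", "cryptomarkets"] else []) ++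
    (if b2 then ["politics", "news", "conservative", "liberal"] else []) ++
    (if b3 then ["sports", "nfl", "nba", "sportsbook"] else []) ++
    (if b4 then ["wallstreetbets", "stocks", "investing", "economics"] else []) ++
    (if b5 then ["technology", "artificial", "stocks"] else []) ++
    ["polymarket", "predictit"]
  let unique := pvFirstOccurrences pool
  if unique.isEmpty then ["news", "worldnews"] else unique

def pvB1 (q : String) : Bool := (["bitcoin", "btc", "crypto", "ethereum", "eth"] : List String).any (fun kw => PySem.Str.isIn kw (PySem.Str.lower q))
def pvB2 (q : String) : Bool := (["trump", "biden", "election", "congress", "senate", "president"] : List String).any (fun kw => PySem.Str.isIn kw (PySem.Str.lower q))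
def pvB3 (q : String) : Bool := (["nfl", "nba", "super bowl", "championship", "playoffs"] : List String).any (fun kw => PySem.Str.isIn kw (PySem.Str.lower q))
def pvB4 (q : String) : Bool := (["stock", "market", "fed", "interest rate", "inflation"] : List String).any (fun kw => PySem.Str.isIn kw (PySem.Str.lower q))
def pvB5 (q : String) : Bool := (["ai", "tech", "apple", "google", "microsoft"] : List String).any (fun kw => PySem.Str.isIn kw (PySem.Str.lower q))

lemma pvA_eq_core (q : String) :
    select_subreddits_py q = pvACore (pvB1 q) (pvB2 q) (pvB3 q) (pvB4 q) (pvB5 q) := rfl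

lemma pvB_eq_core (q : String) :
    select_subreddits_py_alt q = pvBCore (pvB1 q) (pvB2 q) (pvB3 q) (pvB4 q) (pvB5 q) := by
  simp only [select_subreddits_py_alt, pvKeywordIndex, pvGroupSubs,
    pv_contains_foldl_add, PySem.List.enumerate, List.flatMap]
  simp [pvBCore, pvB1, pvB2, pvB3, pvB4, pvB5, Bool.and_comm]

lemma pvCore_eq (b1 b2 b3 b4 b5 : Bool) : pvACore b1 b2 b3 b4 b5 = pvBCore b1 b2 b3 b4 b5 := by
  cases b1 <;> cases b2 <;> cases b3 <;> cases b4 <;> cases b5 <;> decide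

-- ===== VERDICT (by name: the statement is the Claim_ definition above) =====
theorem select_subreddits_py_spec : Claim_equal_select_subreddits_py := by
  intro q _
  show select_subreddits_py q = select_subreddits_py_alt q
  rw [pvA_eq_core, pvB_eq_core, pvCore_eq]
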